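-- pv_equiv track=rewrite | github.com/Mira-Murs/api_anomaly_detector | app/scripts/runtime/generate_report.py | norm_endpoint_id
-- ===== SOURCE A (Python) =====
-- def norm_endpoint_id(value: str) -> str:
--     if not value:
--         return ""
--     value = str(value).strip()
--     if value.strip("/") == "__global__":
--         return "__global__"
--     if not value.startswith("/"):
--         value = "/" + value
--
--     parts = []
--     for part in value.split("/"):
--         if part.startswith(":") and len(part) > 1:
--             parts.append("{" + part[1:] + "}")
--         else:
--             parts.append(part)
--
--     return "/".join(parts)
-- ===== SOURCE B (Python) =====
-- # Single left-to-right scan over the string instead of split/loop/join: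
-- # rewrite each ":name" segment right after a "/" while copying characters.
-- def norm_endpoint_id(value: str) -> str:
--     if not value:
--         return ""
--     value = value.strip()
--     if value.strip("/") == "__global__":
--         return "__global__"
--     if not value.startswith("/"):
--         value = "/" + value
--
--     out = []
--     i = 0
--     n = len(value)
--     while i < n:
--         c = value[i]
--         if c == "/" and i + 1 < n and value[i + 1] == ":":
--             j = i + 1
--             while j < n and value[j] != "/":
--                 j += 1
--             seg = value[i + 1:j]
--             out.append("/")
--             if len(seg) > 1:
--                 out.append("{" + seg[1:] + "}")
--             else:
--                 out.append(seg)
--             i = j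
--         else:
--             out.append(c)
--             i += 1
--     return "".join(out)
-- ===== Notes on version B (the rewrite author's own statement) =====
-- stated objective: alternative
-- what changed: Replaced A's split-on-separator / per-part rewrite loop / join re-assembly by a single left-to-right scan of the string that rewrites each colon-prefixed segment in place during the scan.
import Mathlib
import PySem

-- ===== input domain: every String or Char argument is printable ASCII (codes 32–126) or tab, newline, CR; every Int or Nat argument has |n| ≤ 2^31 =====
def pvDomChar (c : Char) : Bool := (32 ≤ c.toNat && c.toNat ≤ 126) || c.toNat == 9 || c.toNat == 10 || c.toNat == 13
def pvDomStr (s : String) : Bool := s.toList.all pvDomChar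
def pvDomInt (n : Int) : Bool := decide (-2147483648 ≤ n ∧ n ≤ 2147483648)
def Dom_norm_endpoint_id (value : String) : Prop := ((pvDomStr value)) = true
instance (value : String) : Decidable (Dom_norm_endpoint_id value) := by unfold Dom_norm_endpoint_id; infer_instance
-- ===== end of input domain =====

-- B replaces A's split-into-parts / rewrite-loop / rejoin by a single left-to-right
-- scan of the string that rewrites colon-prefixed segments in place (alternative decomposition).


-- ===== PORT A =====
-- literal port of A over List Char (PySem.Chars are the List Char forms of the str methods);
-- pvASplitJoin is A's parts = []; for part in value.split("/"): … ; return "/".join(parts)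
def pvASplitJoin (v2 : List Char) : String :=
  String.ofList (PySem.Chars.join ['/']
    ((PySem.Chars.splitOn v2 ['/']).foldl
      (fun acc part =>
        if PySem.Chars.startswith part [':'] && decide (1 < PySem.Chars.len part) then
          acc ++ ['{' :: (PySem.List.slice part (some 1) none ++ ['}'])]   -- "{" + part[1:] + "}"
        else acc ++ [part]) []))

def norm_endpoint_id (value : String) : String :=
  if value.toList = [] then ""                                   -- if not value: return ""
  else
    -- value = str(value).strip()
    if PySem.Chars.stripChars (PySem.Chars.strip value.toList) ['/'] = "__global__".toList
    then "__global__"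
    else
      pvASplitJoin                                               -- if not value.startswith("/"): …
        (if PySem.Chars.startswith (PySem.Chars.strip value.toList) ['/']
         then PySem.Chars.strip value.toList else '/' :: PySem.Chars.strip value.toList)

-- ===== PORT B =====
-- the while-loop of Source B as structural recursion on the characters: copy chars; at a "/"
-- followed by ":", take the segment up to the next "/" (the inner while loop = takeWhile,
-- seg = value[i+1:j] is exactly that segment) and emit it rewritten, resuming at j (= dropWhile)
def pvBScan (l : List Char) : List Char :=
  match l with
  | [] => []
  | c :: rest =>
    if c = '/' ∧ rest.head? = some ':' then       -- c == "/" and i+1 < n and value[i+1] == ":"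
      '/' :: ((if 1 < (rest.takeWhile (· ≠ '/')).length then
                 '{' :: ((rest.takeWhile (· ≠ '/')).drop 1 ++ ['}'])    -- "{" + seg[1:] + "}"
               else rest.takeWhile (· ≠ '/')) ++
               pvBScan (rest.dropWhile (· ≠ '/')))   -- i = j
    else c :: pvBScan rest                        -- i += 1
termination_by l.length
decreasing_by
· simp only [List.length_cons]
  have := List.length_dropWhile_le (· ≠ '/') rest
  omega
· simp

def norm_endpoint_id_alt (value : String) : String :=
  if value.toList = [] then ""
  else
    if PySem.Chars.stripChars (PySem.Chars.strip value.toList) ['/'] = "__global__".toList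
    then "__global__"
    else
      String.ofList (pvBScan
        (if PySem.Chars.startswith (PySem.Chars.strip value.toList) ['/']
         then PySem.Chars.strip value.toList else '/' :: PySem.Chars.strip value.toList))

-- ===== PRECONDITION & SPEC =====
def Spec_norm_endpoint_id (value : String) (out : String) : Prop := out = norm_endpoint_id_alt value
instance (value : String) (out : String) : Decidable (Spec_norm_endpoint_id value out) := by unfold Spec_norm_endpoint_id; infer_instance

-- ===== CLAIM (what is proved, stated in full; the proofs are below) =====
def Claim_equal_norm_endpoint_id : Prop := ∀ (value : String), Dom_norm_endpoint_id value → Spec_norm_endpoint_id value (norm_endpoint_id value)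

-- ===== LEMMAS AND PROOFS =====

-- A's per-part rewrite as a function
def pvF (p : List Char) : List Char :=
  if PySem.Chars.startswith p [':'] && decide (1 < PySem.Chars.len p) then
    '{' :: (PySem.List.slice p (some 1) none ++ ['}'])
  else p

-- Python's s.split("/") as head-segment + recursion
def pvSp (l : List Char) : List (List Char) :=
  l.takeWhile (· ≠ '/') ::
    (if l.dropWhile (· ≠ '/') = [] then [] else pvSp (l.dropWhile (· ≠ '/')).tail)
termination_by l.length
decreasing_by
  have h1 : (l.dropWhile (· ≠ '/')).length ≤ l.length := List.length_dropWhile_le _ l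
  have h2 : 0 < (l.dropWhile (· ≠ '/')).length := List.length_pos_of_ne_nil (by assumption)
  simp only [List.length_tail]
  omega

-- the common suffix: everything from the first '/' on, segments rewritten by pvF
def pvTail (l : List Char) : List Char :=
  match l with
  | [] => []
  | _ :: r => '/' :: (pvF (r.takeWhile (· ≠ '/')) ++ pvTail (r.dropWhile (· ≠ '/')))
termination_by l.length
decreasing_by
  simp only [List.length_cons]
  have := List.length_dropWhile_le (· ≠ '/') r
  omega

theorem pvDrop_shape (l : List Char) :
    l.dropWhile (· ≠ '/') = [] ∨ ∃ r, l.dropWhile (· ≠ '/') = '/' :: r := by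
  induction l with
  | nil => left; rfl
  | cons c rest ih =>
    by_cases hc : c = '/'
    · right; exact ⟨rest, by simp [hc]⟩
    · simpa [List.dropWhile_cons, hc] using ih

theorem pvF_nil : pvF [] = [] := by decide

theorem pvF_no_colon (rest : List Char) (h : rest.head? ≠ some ':') :
    pvF (rest.takeWhile (· ≠ '/')) = rest.takeWhile (· ≠ '/') := by
  cases rest with
  | nil => decide
  | cons c r =>
    have hc : c ≠ ':' := by intro hc; exact h (by simp [hc])
    by_cases hs : c = '/'
    · simp [hs, pvF]
    · simp [hs, pvF, PySem.Chars.startswith, List.isPrefixOf, Ne.symm hc]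

theorem pvF_colon (s : List Char) :
    pvF (':' :: s) = (if 1 < (':' :: s).length then '{' :: ((':' :: s).drop 1 ++ ['}']) else ':' :: s) := by
  cases s with
  | nil => decide
  | cons a s' =>
    simp [pvF, PySem.Chars.startswith, List.isPrefixOf, PySem.Chars.len_eq,
      PySem.List.slice_from_one]

theorem pvSp_cons (l : List Char) : ∃ tl, pvSp l = l.takeWhile (· ≠ '/') :: tl := by
  rw [pvSp]; exact ⟨_, rfl⟩

theorem pvGo_eq (fuel : ℕ) : ∀ (l cur : List Char) (acc : List (List Char)),
    l.length < fuel →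
    PySem.Chars.splitOn.go ['/'] fuel l cur acc
      = acc.reverse ++ (pvSp l).modifyHead (cur.reverse ++ ·) := by
  induction fuel with
  | zero => intro l cur acc h; omega
  | succ n ih =>
    intro l cur acc h
    cases l with
    | nil =>
      rw [PySem.Chars.splitOn.go, pvSp]
      simp
      omega
    | cons c rest =>
      by_cases hc : c = '/'
      · subst hc
        rw [PySem.Chars.splitOn.go, if_pos (by simp [List.isPrefixOf])]
        simp only [List.length_cons, List.length_nil, List.drop_succ_cons, List.drop_zero]
        rw [ih rest [] _ (by simpa using h)]
        obtain ⟨tl, hsp⟩ := pvSp_cons rest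
        conv_rhs => rw [pvSp]
        simp [hsp, List.dropWhile_cons]
      · rw [PySem.Chars.splitOn.go,
          if_neg (by simp [List.isPrefixOf, Ne.symm hc])]
        rw [ih rest (c :: cur) _ (by simpa using h)]
        conv_lhs => rw [pvSp]
        conv_rhs => rw [pvSp]
        simp [hc]

theorem pvSplitOn_eq (l : List Char) : PySem.Chars.splitOn l ['/'] = pvSp l := by
  rw [PySem.Chars.splitOn, pvGo_eq (l.length + 1) l [] [] (by omega)]
  obtain ⟨tl, hsp⟩ := pvSp_cons l
  simp [hsp]

theorem pvFoldl_eq (parts : List (List Char)) (acc : List (List Char)) :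
    parts.foldl
      (fun acc part =>
        if PySem.Chars.startswith part [':'] && decide (1 < PySem.Chars.len part) then
          acc ++ ['{' :: (PySem.List.slice part (some 1) none ++ ['}'])]
        else acc ++ [part]) acc = acc ++ parts.map pvF := by
  induction parts generalizing acc with
  | nil => simp
  | cons p t ih =>
    simp only [List.foldl_cons, List.map_cons, ih, pvF]
    split <;> simp

theorem pvJoin_eq : ∀ (n : ℕ) (l : List Char), l.length ≤ n →
    PySem.Chars.join ['/'] ((pvSp l).map pvF)
      = pvF (l.takeWhile (· ≠ '/')) ++ pvTail (l.dropWhile (· ≠ '/')) := by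
  intro n
  induction n with
  | zero =>
    intro l h
    have hl : l = [] := List.length_eq_zero_iff.mp (by omega)
    subst hl
    rw [pvSp]
    simp [pvTail, PySem.Chars.join_singleton]
  | succ n ih =>
    intro l h
    rw [pvSp]
    rcases pvDrop_shape l with hd | ⟨r, hd⟩
    · rw [if_pos hd, hd]
      simp [PySem.Chars.join_singleton, pvTail]
    · rw [if_neg (by rw [hd]; simp), hd]
      simp only [List.tail_cons, List.map_cons]
      obtain ⟨tl, hsp⟩ := pvSp_cons r
      rw [hsp, List.map_cons, PySem.Chars.join_cons_cons, ← List.map_cons, ← hsp]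
      have hlen : r.length ≤ n := by
        have h1 : (l.dropWhile (· ≠ '/')).length ≤ l.length := List.length_dropWhile_le _ l
        rw [hd] at h1; simp at h1; omega
      rw [ih r hlen, pvTail]
      simp

theorem pvBScan_eq : ∀ (n : ℕ) (l : List Char), l.length ≤ n →
    pvBScan l = l.takeWhile (· ≠ '/') ++ pvTail (l.dropWhile (· ≠ '/')) := by
  intro n
  induction n with
  | zero =>
    intro l h
    have hl : l = [] := List.length_eq_zero_iff.mp (by omega)
    subst hl
    simp [pvBScan, pvTail]
  | succ n ih =>
    intro l h
    cases l with
    | nil => simp [pvBScan, pvTail]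
    | cons c rest =>
      by_cases hc : c = '/'
      · subst hc
        have h1 : List.takeWhile (· ≠ '/') ('/' :: rest) = [] := by simp
        have h2 : List.dropWhile (· ≠ '/') ('/' :: rest) = '/' :: rest := by simp
        rw [h1, h2, List.nil_append, pvTail]
        by_cases hcol : rest.head? = some ':'
        · rw [pvBScan, if_pos ⟨rfl, hcol⟩]
          obtain ⟨rr, hrest⟩ : ∃ rr, rest = ':' :: rr := by
            cases rest with
            | nil => simp at hcol
            | cons a b => simp at hcol; exact ⟨b, by rw [hcol]⟩
          subst hrest
          have htail : pvBScan (List.dropWhile (· ≠ '/') rr) = pvTail (List.dropWhile (· ≠ '/') rr) := by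
            rcases pvDrop_shape rr with hdd | ⟨r2, hdd⟩
            · rw [hdd]; simp [pvBScan, pvTail]
            · have hlen : (List.dropWhile (· ≠ '/') rr).length ≤ n := by
                have := List.length_dropWhile_le (· ≠ '/') rr
                simp at h; omega
              rw [ih _ hlen, hdd]
              simp
          simp only [List.takeWhile_cons, List.dropWhile_cons]
          simp [pvF_colon]
          simpa using htail
        · rw [pvBScan, if_neg (by simp [hcol])]
          rw [ih rest (by simpa using h), pvF_no_colon rest hcol]
      · rw [pvBScan, if_neg (by simp [hc])]
        rw [ih rest (by simpa using h)]
        simp [hc]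

-- the two cores agree on any list that starts with '/'
theorem pvCore_eq (t : List Char) :
    pvASplitJoin ('/' :: t) = String.ofList (pvBScan ('/' :: t)) := by
  unfold pvASplitJoin
  rw [pvSplitOn_eq, pvFoldl_eq, List.nil_append,
    pvJoin_eq ('/' :: t).length _ le_rfl,
    pvBScan_eq ('/' :: t).length _ le_rfl]
  simp [pvF_nil]

theorem pvStartswith_slash (v : List Char) (h : PySem.Chars.startswith v ['/'] = true) :
    ∃ t, v = '/' :: t := by
  cases v with
  | nil => simp [PySem.Chars.startswith, List.isPrefixOf] at h
  | cons c r =>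
    simp [PySem.Chars.startswith, List.isPrefixOf] at h
    exact ⟨r, by rw [h]⟩

-- ===== VERDICT (by name: the statement is the Claim_ definition above) =====
theorem norm_endpoint_id_spec : Claim_equal_norm_endpoint_id := by
  intro value _
  unfold Spec_norm_endpoint_id norm_endpoint_id norm_endpoint_id_alt
  by_cases h0 : value.toList = []
  · simp [h0]
  · rw [if_neg h0, if_neg h0]
    by_cases hg : PySem.Chars.stripChars (PySem.Chars.strip value.toList) ['/'] = "__global__".toList
    · rw [if_pos hg, if_pos hg]
    · rw [if_neg hg, if_neg hg]
      obtain ⟨t, ht⟩ : ∃ t, (if PySem.Chars.startswith (PySem.Chars.strip value.toList) ['/'] then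
          PySem.Chars.strip value.toList else '/' :: PySem.Chars.strip value.toList) = '/' :: t := by
        split
        · exact pvStartswith_slash _ (by assumption)
        · exact ⟨_, rfl⟩
      rw [ht, pvCore_eq]
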